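-- pv_equiv track=rewrite | github.com/F1R3-0M8/NameCrushTest | Flames.py | Flames
-- ===== SOURCE A (Python) =====
-- def Flames(name1, name2):
--     nameConcat = name1 + name2
--
--     for carac in nameConcat:
--         if nameConcat.count(carac) != 1:
--             nameConcat = nameConcat.replace(carac, "")
--
--     letterCount = len(nameConcat)
--
--     #f friend
--     #l love
--     #a affection
--     #m mariage
--     #e enemy
--     #s siblings
--
--     modulo = letterCount % 6
--     # while modulo > 5:
--     #     modulo = modulo % 6
--     #Ce modulo ne sert à rien car le reste max d'un modulo (X % n) est égale à N-1, ici 6-1 = 5 donc "Dans la bagarre"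
--
--     switcher= {
--     1: "FriendZoné",
--     2: "Amoureux ",
--     3: "Trop in love l'un pour l'autre",
--     4: "Bientot marrié (OULAH!)",
--     5: "Dans la bagarre",
--     0: "Des frérots"
--     }
--
--     return switcher.get(modulo, "Insignifiant l'un pour l'autre")
-- ===== SOURCE B (Python) =====
-- def Flames(name1, name2):
--     s = sorted(name1 + name2)
--     n = len(s)
--     letterCount = 0
--     i = 0
--     while i < n:
--         j = i
--         while j < n and s[j] == s[i]:
--             j += 1
--         if j - i == 1:
--             letterCount += 1
--         i = j
--
--     modulo = letterCount % 6
--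
--     switcher = {
--         1: "FriendZoné",
--         2: "Amoureux ",
--         3: "Trop in love l'un pour l'autre",
--         4: "Bientot marrié (OULAH!)",
--         5: "Dans la bagarre",
--         0: "Des frérots",
--     }
--
--     return switcher.get(modulo, "Insignifiant l'un pour l'autre")
-- ===== Notes on version B (the rewrite author's own statement) =====
-- stated objective: alternative
-- what changed: A repeatedly counts each character in the (mutating) concatenated string and deletes all its occurrences via str.replace when the count is not 1; B instead sorts the concatenation once and scans it for runs of length exactly 1, counting those runs, then applies the same modulo-6 dict mapping.
import Mathlib
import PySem

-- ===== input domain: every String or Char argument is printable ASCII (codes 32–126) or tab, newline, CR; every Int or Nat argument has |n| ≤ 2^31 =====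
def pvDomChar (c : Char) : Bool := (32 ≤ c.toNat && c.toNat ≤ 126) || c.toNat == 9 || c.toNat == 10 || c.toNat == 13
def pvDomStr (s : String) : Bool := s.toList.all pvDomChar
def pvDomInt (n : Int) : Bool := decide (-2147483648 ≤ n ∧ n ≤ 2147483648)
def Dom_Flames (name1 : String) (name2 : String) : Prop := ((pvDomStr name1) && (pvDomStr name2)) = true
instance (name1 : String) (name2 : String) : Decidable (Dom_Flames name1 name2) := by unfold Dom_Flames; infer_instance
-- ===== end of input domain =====

-- B replaces A's destructive count-and-replace loop over the concatenated string by
-- sort-then-scan: runs of length exactly 1 in the sorted string are counted (objective: alternative).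

-- ===== PORT A =====
-- the body of A's for-loop: if nameConcat.count(carac) != 1: nameConcat = nameConcat.replace(carac, "")
def flamesStep (cur : List Char) (carac : Char) : List Char :=
  if PySem.Chars.count cur [carac] ≠ 1 then PySem.Chars.replace cur [carac] [] else cur

def Flames (name1 : String) (name2 : String) : String :=
  let nameConcat := name1.toList ++ name2.toList
  -- for carac in nameConcat: … (iterates over the ORIGINAL string; the variable is rebound inside)
  let final := nameConcat.foldl flamesStep nameConcat
  let letterCount : Int := (PySem.Chars.len final : Int)
  let modulo : Int := PySem.Int.mod letterCount 6
  let switcher : PySem.Dict Int String :=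
    (((((PySem.Dict.empty.insert 1 "FriendZoné").insert 2 "Amoureux ").insert 3
        "Trop in love l'un pour l'autre").insert 4 "Bientot marrié (OULAH!)").insert 5
        "Dans la bagarre").insert 0 "Des frérots"
  switcher.getD modulo "Insignifiant l'un pour l'autre"

-- ===== PORT B =====
-- the two while-loops of Source B: the inner loop (j) advances over the run of s[i];
-- the outer loop adds 1 when the run has length exactly 1 and restarts at the run's end.
def countSingles : List Char → Int
  | [] => 0
  | c :: rest =>
    (if rest.takeWhile (fun d => d == c) = [] then 1 else 0) +
      countSingles (rest.dropWhile (fun d => d == c))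
termination_by l => l.length
decreasing_by
  simpa using Nat.lt_succ_of_le (List.length_dropWhile_le _ _)

def Flames_alt (name1 : String) (name2 : String) : String :=
  let s := PySem.List.sorted (name1.toList ++ name2.toList) (fun c => c) false
  let letterCount : Int := countSingles s
  let modulo : Int := PySem.Int.mod letterCount 6
  let switcher : PySem.Dict Int String :=
    (((((PySem.Dict.empty.insert 1 "FriendZoné").insert 2 "Amoureux ").insert 3
        "Trop in love l'un pour l'autre").insert 4 "Bientot marrié (OULAH!)").insert 5
        "Dans la bagarre").insert 0 "Des frérots"
  switcher.getD modulo "Insignifiant l'un pour l'autre"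

-- ===== PRECONDITION & SPEC =====
def Spec_Flames (name1 : String) (name2 : String) (out : String) : Prop := out = Flames_alt name1 name2
instance (name1 : String) (name2 : String) (out : String) : Decidable (Spec_Flames name1 name2 out) := by unfold Spec_Flames; infer_instance

-- ===== CLAIM (what is proved, stated in full; the proofs are below) =====
def Claim_equal_Flames : Prop := ∀ (name1 : String) (name2 : String), Dom_Flames name1 name2 → Spec_Flames name1 name2 (Flames name1 name2)

-- ===== LEMMAS AND PROOFS =====

-- str.count of a single-character needle is the character count
theorem count_go_single (c : Char) :
    ∀ (fuel : Nat) (l : List Char) (acc : Nat), l.length ≤ fuel →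
      PySem.Chars.count.go [c] fuel l acc = acc + l.count c := by
  intro fuel
  induction fuel with
  | zero =>
    intro l acc h
    have : l = [] := List.eq_nil_of_length_eq_zero (Nat.le_zero.mp h)
    subst this; simp [PySem.Chars.count.go]
  | succ n ih =>
    intro l acc h
    match l with
    | [] => simp [PySem.Chars.count.go]
    | a :: t =>
      simp only [PySem.Chars.count.go]
      by_cases hc : c = a
      · subst hc
        have hp : [c].isPrefixOf (c :: t) = true := by simp [List.isPrefixOf]
        simp only [hp, if_pos]
        rw [show List.drop (List.length [c]) (c :: t) = t by simp]
        rw [ih t (acc + 1) (by simpa using h)]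
        simp
        omega
      · have hp : [c].isPrefixOf (a :: t) = false := by
          simp [List.isPrefixOf]; exact fun hh => hc hh
        simp only [hp]
        rw [if_neg (by simp)]
        rw [ih t acc (by simpa using h)]
        simp [Ne.symm hc]

theorem count_single (l : List Char) (c : Char) :
    PySem.Chars.count l [c] = l.count c := by
  simp [PySem.Chars.count, count_go_single c l.length l 0 le_rfl]

-- str.replace of a single character by "" is a filter
theorem replace_go_single (c : Char) :
    ∀ (fuel : Nat) (l : List Char) (acc : List Char), l.length ≤ fuel →
      PySem.Chars.replace.go [c] [] fuel l acc = acc.reverse ++ l.filter (fun d => !(d == c)) := by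
  intro fuel
  induction fuel with
  | zero =>
    intro l acc h
    have : l = [] := List.eq_nil_of_length_eq_zero (Nat.le_zero.mp h)
    subst this; simp [PySem.Chars.replace.go]
  | succ n ih =>
    intro l acc h
    match l with
    | [] => simp [PySem.Chars.replace.go]
    | a :: t =>
      simp only [PySem.Chars.replace.go]
      by_cases hc : c = a
      · subst hc
        have hp : [c].isPrefixOf (c :: t) = true := by simp [List.isPrefixOf]
        simp only [hp, if_pos]
        rw [show List.drop (List.length [c]) (c :: t) = t by simp]
        rw [show ([] : List Char).reverse ++ acc = acc by simp]
        rw [ih t acc (by simpa using h)]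
        simp
      · have hp : [c].isPrefixOf (a :: t) = false := by
          simp [List.isPrefixOf]; exact fun hh => hc hh
        simp only [hp]
        rw [if_neg (by simp)]
        rw [ih t (a :: acc) (by simpa using h)]
        simp [Ne.symm hc]

theorem replace_single (l : List Char) (c : Char) :
    PySem.Chars.replace l [c] [] = l.filter (fun d => !(d == c)) := by
  simp [PySem.Chars.replace, replace_go_single c l.length l [] le_rfl]

-- invariant of A's loop: after the prefix p of the original string has been processed,
-- the current string is the original filtered to chars occurring once or not yet seen
theorem loopA (s : List Char) :
    ∀ (q p : List Char), s = p ++ q →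
      q.foldl flamesStep (s.filter (fun x => (s.count x == 1) || !(p.contains x)))
        = s.filter (fun x => s.count x == 1) := by
  intro q
  induction q with
  | nil =>
    intro p h
    simp only [List.foldl_nil]
    apply List.filter_congr
    intro x hx
    have hxp : x ∈ p := by rw [h] at hx; simpa using hx
    simp [hxp]
  | cons a q' ih =>
    intro p h
    have hstep : flamesStep (s.filter (fun x => (s.count x == 1) || !(p.contains x))) a
        = s.filter (fun x => (s.count x == 1) || !((p ++ [a]).contains x)) := by
      unfold flamesStep
      rw [count_single]
      by_cases h1 : s.count a = 1
      · have hpa : (fun x => (s.count x == 1) || !(p.contains x)) a = true := by simp [h1]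
        have hcf := List.count_filter (p := fun x => (s.count x == 1) || !(p.contains x))
          (a := a) (l := s) hpa
        rw [hcf, if_neg (by simp [h1])]
        apply List.filter_congr
        intro x hx
        by_cases hxa : x = a
        · subst hxa; simp [h1]
        · have : ((p ++ [a]).contains x) = p.contains x := by
            simp [hxa]
          rw [this]
      · have hcnt : (s.filter (fun x => (s.count x == 1) || !(p.contains x))).count a ≠ 1 := by
          by_cases hpmem : a ∈ p
          · rw [List.count_eq_zero.mpr (by simp [List.mem_filter, h1, hpmem])]
            omega
          · have hpa : (fun x => (s.count x == 1) || !(p.contains x)) a = true := by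
              simp [hpmem]
            have hcf := List.count_filter (p := fun x => (s.count x == 1) || !(p.contains x))
              (a := a) (l := s) hpa
            rw [hcf]; exact h1
        rw [if_pos hcnt, replace_single, List.filter_filter]
        apply List.filter_congr
        intro x hx
        by_cases hxa : x = a
        · subst hxa
          simp [h1]
        · simp [hxa]
    rw [List.foldl_cons, hstep, ih (p ++ [a]) (by rw [h]; simp)]

theorem loopA_final (s : List Char) :
    s.foldl flamesStep s = s.filter (fun x => s.count x == 1) := by
  simpa using loopA s s [] rfl

-- B's run scan on a sorted list counts the characters occurring exactly once
theorem countSingles_grouped (l : List Char) (h : l.Pairwise (· ≤ ·)) :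
    countSingles l = ((l.filter (fun x => l.count x == 1)).length : Int) := by
  induction l using countSingles.induct with
  | case1 => simp [countSingles]
  | case2 c rest ih =>
    set tw := rest.takeWhile (fun d => d == c) with htw
    set dw := rest.dropWhile (fun d => d == c) with hdw
    have hsplit : rest = tw ++ dw := (List.takeWhile_append_dropWhile).symm
    have htwc : ∀ d ∈ tw, d = c := fun d hd => by
      simpa using List.mem_takeWhile_imp hd
    have hrest : rest.Pairwise (· ≤ ·) := h.of_cons
    have hdwp : dw.Pairwise (· ≤ ·) := hrest.sublist (List.dropWhile_sublist _)
    have hcdw : c ∉ dw := by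
      intro hmem
      have hne : dw ≠ [] := by intro hnil; rw [hnil] at hmem; simp at hmem
      have hd := List.head_dropWhile_not (fun d => d == c) hne
      set d := dw.head hne with hdd
      have hdc : d ≠ c := by simpa using hd
      have hdmem : d ∈ rest := (List.dropWhile_sublist _).mem (List.head_mem hne)
      have hcd : c ≤ d := (List.pairwise_cons.mp h).1 d hdmem
      have hdcle : d ≤ c := by
        obtain ⟨d', t, hdt⟩ : ∃ d' t, dw = d' :: t := by
          cases hdwq : dw with
          | nil => exact absurd hdwq hne
          | cons x xs => exact ⟨x, xs, rfl⟩
        have hdd' : d = d' := by rw [hdd]; simp [hdt]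
        rw [hdt] at hmem hdwp
        rcases List.mem_cons.mp hmem with h1 | h2
        · exact absurd (hdd' ▸ h1.symm) hdc
        · exact hdd' ▸ (List.pairwise_cons.mp hdwp).1 c h2
      exact hdc (le_antisymm hdcle hcd)
    have htwcount : tw.count c = tw.length := List.count_eq_length.mpr (fun b hb => (htwc b hb).symm)
    have hdwcount : dw.count c = 0 := List.count_eq_zero.mpr hcdw
    have hccount : (c :: rest).count c = 1 + tw.length := by
      rw [List.count_cons_self, hsplit, List.count_append, htwcount, hdwcount]; omega
    have hfil : (c :: rest).filter (fun x => (c :: rest).count x == 1)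
        = (if tw = [] then [c] else []) ++ dw.filter (fun x => dw.count x == 1) := by
      rw [show (c :: rest) = c :: (tw ++ dw) from by rw [hsplit]]
      rw [List.filter_cons, List.filter_append]
      have h1 : tw.filter (fun x => (c :: (tw ++ dw)).count x == 1) = [] := by
        rw [List.filter_eq_nil_iff]
        intro b hb
        rw [htwc b hb]
        have hlen : tw.length ≠ 0 := fun hz => by
          rw [List.eq_nil_of_length_eq_zero hz] at hb; simp at hb
        have hc1 : List.count c (c :: (tw ++ dw)) = 1 + tw.length := by
          rw [← hsplit]; exact hccount
        rw [hc1]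
        simp only [beq_iff_eq]
        omega
      have h2 : dw.filter (fun x => (c :: (tw ++ dw)).count x == 1)
          = dw.filter (fun x => dw.count x == 1) := by
        apply List.filter_congr
        intro x hx
        have hxc : x ≠ c := fun he => hcdw (he ▸ hx)
        have : (c :: (tw ++ dw)).count x = dw.count x := by
          rw [List.count_cons, List.count_append]
          have : tw.count x = 0 := List.count_eq_zero.mpr (fun hm => hxc (htwc x hm))
          simp [this, Ne.symm hxc]
        rw [this]
      rw [h1, h2]
      have hcc2 : ((c :: (tw ++ dw)).count c == 1) = (if tw = [] then true else false) := by
        rw [← hsplit]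
        split
        · next htnil => simp [hccount, htnil]
        · next htnil =>
          have hlen0 : tw.length ≠ 0 := fun hz => htnil (List.eq_nil_of_length_eq_zero hz)
          simp [hccount]; omega
      rw [hcc2]
      split <;> simp
    rw [countSingles, hfil]
    rw [ih hdwp]
    split
    · simp [Int.add_comm]
    · simp

theorem filter_once_length_perm {l s : List Char} (h : l.Perm s) :
    (l.filter (fun x => l.count x == 1)).length = (s.filter (fun x => s.count x == 1)).length := by
  have h1 : l.filter (fun x => l.count x == 1) = l.filter (fun x => s.count x == 1) :=
    List.filter_congr (fun x _ => by rw [h.count_eq])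
  rw [h1, (h.filter _).length_eq]

-- ===== VERDICT (by name: the statement is the Claim_ definition above) =====
theorem Flames_spec : Claim_equal_Flames := by
  intro name1 name2 _
  unfold Spec_Flames Flames Flames_alt
  have hA := loopA_final (name1.toList ++ name2.toList)
  have hB := countSingles_grouped (PySem.List.sorted (name1.toList ++ name2.toList) (fun c => c) false)
    (by simpa using PySem.List.sorted_pairwise (name1.toList ++ name2.toList) (fun c => c))
  have hP := filter_once_length_perm (PySem.List.sorted_perm (name1.toList ++ name2.toList) (fun c => c) false)
  simp only [hA, hB, hP, PySem.Chars.len_eq]
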